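-- pv_equiv track=rewrite | github.com/r7wang/algorithm | src/array/two_dim/__init__.py | make_2d_array_yx_seeded_row_order_using_iter
-- ===== SOURCE A (Python) =====
-- from typing import List, Any, Iterator
--
-- def seed_2d_array_yx(width: int, height: int) -> List:
--     arr = []
--     for _ in range(0, height):
--         # List generation is a pretty neat trick.
--         arr.append([-1] * width)
--     return arr
--
-- def make_2d_array_yx_seeded_row_order_using_iter(items: List, width: int, height: int) -> List:
--     """
--     Properties:
--         - initially seeded with None
--         - applies items in row order, left to right
--         - uses an iterator to apply as many items as possible
--     """
--
--     arr = seed_2d_array_yx(width, height)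
--     items_iter = iter(items)
--     try:
--         for y in range(0, height):
--             for x in range(0, width):
--                 arr[y][x] = next(items_iter)
--     except StopIteration:
--         pass
--     return arr
-- ===== SOURCE B (Python) =====
-- def make_2d_array_yx_seeded_row_order_using_iter(items, width, height):
--     # Build each row directly: slice a width-sized chunk, right-pad with -1.
--     w = max(width, 0)
--     grid = []
--     for y in range(height):
--         row = items[y * w:(y + 1) * w]
--         row += [-1] * (w - len(row))
--         grid.append(row)
--     return grid
-- ===== Notes on version B (the rewrite author's own statement) =====
-- stated objective: simpler
-- what changed: Builds each row directly by slicing a width-sized chunk of items and right-padding with -1, instead of seeding a full grid of -1s and then overwriting cells one at a time from an iterator guarded by try/except StopIteration.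
import Mathlib
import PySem

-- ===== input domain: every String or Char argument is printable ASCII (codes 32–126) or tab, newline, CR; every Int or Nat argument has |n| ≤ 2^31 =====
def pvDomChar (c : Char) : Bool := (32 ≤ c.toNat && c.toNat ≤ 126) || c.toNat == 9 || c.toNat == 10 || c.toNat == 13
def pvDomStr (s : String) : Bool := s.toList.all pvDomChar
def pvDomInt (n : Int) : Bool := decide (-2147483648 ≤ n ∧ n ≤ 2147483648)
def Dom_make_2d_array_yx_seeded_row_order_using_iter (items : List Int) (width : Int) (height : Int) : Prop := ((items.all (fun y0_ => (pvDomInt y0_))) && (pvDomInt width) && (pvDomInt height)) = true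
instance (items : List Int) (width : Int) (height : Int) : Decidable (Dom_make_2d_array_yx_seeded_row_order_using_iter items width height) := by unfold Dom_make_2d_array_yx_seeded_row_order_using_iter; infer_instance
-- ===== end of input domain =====

-- B builds each row directly (slice a width-sized chunk of items, right-pad with -1)
-- instead of seeding the whole grid with -1 and overwriting cell by cell from an
-- iterator guarded by try/except; same result, simpler decomposition.

-- ===== PORT A =====
-- helper of A: seed_2d_array_yx (arr.append([-1] * width) per y in range(0, height));
-- [-1] * width is empty for width ≤ 0, exactly List.replicate width.toNat
def seed_2d_array_yx (width : Int) (height : Int) : List (List Int) :=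
  (PySem.List.pyRange 0 height 1).foldl
    (fun arr _ => arr ++ [List.replicate width.toNat (-1)]) []

-- one cell of A's fill loop: state = (arr, remaining iterator, StopIteration-raised flag);
-- `arr[y][x] = next(items_iter)`; y, x come from range(0, …) so they are ≥ 0 and
-- y.toNat / x.toNat are exact (no negative-index wraparound can occur here)
def pvCellStep (y : Int) (s : List (List Int) × List Int × Bool) (x : Int) :
    List (List Int) × List Int × Bool :=
  match s with
  | (arr, it, true) => (arr, it, true)
  | (arr, [], false) => (arr, [], true)
  | (arr, v :: rest, false) =>
      (arr.modify y.toNat (fun row => row.set x.toNat v), rest, false)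

def make_2d_array_yx_seeded_row_order_using_iter (items : List Int) (width : Int) (height : Int) : List (List Int) :=
  let arr := seed_2d_array_yx width height
  let s := (PySem.List.pyRange 0 height 1).foldl
    (fun s y => (PySem.List.pyRange 0 width 1).foldl (pvCellStep y) s)
    (arr, items, false)
  s.1

-- ===== PORT B =====
def make_2d_array_yx_seeded_row_order_using_iter_alt (items : List Int) (width : Int) (height : Int) : List (List Int) :=
  let w := max width 0
  (PySem.List.pyRange 0 height 1).foldl
    (fun grid y =>
      let row := PySem.List.slice items (some (y * w)) (some ((y + 1) * w))
      grid ++ [row ++ List.replicate (w - (row.length : Int)).toNat (-1)]) []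

-- ===== PRECONDITION & SPEC =====
def Spec_make_2d_array_yx_seeded_row_order_using_iter (items : List Int) (width : Int) (height : Int) (out : List (List Int)) : Prop := out = make_2d_array_yx_seeded_row_order_using_iter_alt items width height
instance (items : List Int) (width : Int) (height : Int) (out : List (List Int)) : Decidable (Spec_make_2d_array_yx_seeded_row_order_using_iter items width height out) := by unfold Spec_make_2d_array_yx_seeded_row_order_using_iter; infer_instance

-- ===== CLAIM (what is proved, stated in full; the proofs are below) =====
def Claim_equal_make_2d_array_yx_seeded_row_order_using_iter : Prop := ∀ (items : List Int) (width : Int) (height : Int), Dom_make_2d_array_yx_seeded_row_order_using_iter items width height → Spec_make_2d_array_yx_seeded_row_order_using_iter items width height (make_2d_array_yx_seeded_row_order_using_iter items width height)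

-- ===== LEMMAS AND PROOFS =====

-- the common normal form: row k is the k-th width-chunk of items padded with -1
def pvRow (items : List Int) (W : Nat) (k : Nat) : List Int :=
  (items.drop (k * W)).take W
    ++ List.replicate (W - ((items.drop (k * W)).take W).length) (-1)

def pvGrid (items : List Int) (W : Nat) (H : Nat) : List (List Int) :=
  (List.range H).map (pvRow items W)

-- sequence of single-cell writes row[p+i] := vals[i]
def pvSetSeg : List Int → Nat → List Int → List Int
  | row, _, [] => row
  | row, p, v :: vs => pvSetSeg (row.set p v) (p + 1) vs

theorem pv_modify_id {α : Type} : ∀ (l : List α) (i : Nat), l.modify i (fun a => a) = l := by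
  intro l
  induction l with
  | nil => intro i; simp
  | cons a t ih => intro i; cases i <;> simp [ih]

theorem pv_modify_modify {α : Type} :
    ∀ (l : List α) (i : Nat) (f g : α → α), (l.modify i f).modify i g = l.modify i (fun a => g (f a)) := by
  intro l
  induction l with
  | nil => intro i f g; simp
  | cons a t ih => intro i f g; cases i <;> simp [ih]

theorem pv_modify_append {α : Type} :
    ∀ (l r : List α) (f : α → α), (l ++ r).modify l.length f = l ++ r.modify 0 f := by
  intro l
  induction l with
  | nil => intro r f; simp
  | cons a t ih => intro r f; simpa using ih r f

theorem pv_modify_append' {α : Type} (l r : List α) (i : Nat) (f : α → α)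
    (h : l.length = i) : (l ++ r).modify i f = l ++ r.modify 0 f := by
  subst h; exact pv_modify_append l r f

theorem pv_foldl_append_map {α β : Type} (f : α → β) :
    ∀ (l : List α) (acc : List β), l.foldl (fun g y => g ++ [f y]) acc = acc ++ l.map f := by
  intro l
  induction l with
  | nil => intro acc; simp
  | cons a t ih => intro acc; simp [ih]

theorem pv_foldl_append_const {α β : Type} (r : β) :
    ∀ (l : List α) (acc : List β),
      l.foldl (fun g (_ : α) => g ++ [r]) acc = acc ++ List.replicate l.length r := by
  intro l
  induction l with
  | nil => intro acc; simp
  | cons a t ih => intro acc; simp [ih, List.replicate_succ]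

theorem pv_seed_eq (width height : Int) :
    seed_2d_array_yx width height
      = List.replicate height.toNat (List.replicate width.toNat (-1)) := by
  unfold seed_2d_array_yx
  rw [pv_foldl_append_const]
  simp [PySem.List.length_pyRange_one]

theorem pv_frozen (y : Int) :
    ∀ (l : List Int) (arr : List (List Int)) (it : List Int),
      l.foldl (pvCellStep y) (arr, it, true) = (arr, it, true) := by
  intro l
  induction l with
  | nil => intro arr it; rfl
  | cons a t ih => intro arr it; simpa [pvCellStep] using ih arr it

theorem pv_setSeg_fill :
    ∀ (vals pre row : List Int), vals.length ≤ row.length →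
      pvSetSeg (pre ++ row) pre.length vals = pre ++ (vals ++ row.drop vals.length) := by
  intro vals
  induction vals with
  | nil => intro pre row _; simp [pvSetSeg]
  | cons v vs ih =>
      intro pre row hlen
      cases row with
      | nil => simp at hlen
      | cons r rs =>
          have hset : (pre ++ r :: rs).set pre.length v = (pre ++ [v]) ++ rs := by
            rw [List.set_append_right _ _ (Nat.le_refl _)]
            simp
          have hlen' : (pre ++ [v]).length = pre.length + 1 := by simp
          have : pvSetSeg (pre ++ r :: rs) pre.length (v :: vs)
              = pvSetSeg ((pre ++ [v]) ++ rs) (pre ++ [v]).length vs := by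
            simp [pvSetSeg, hset, hlen']
          rw [this, ih (pre ++ [v]) rs (by simpa using Nat.le_of_succ_le_succ hlen)]
          simp

theorem pv_inner (y : Int) :
    ∀ (n : Nat), ∀ (a : Int), 0 ≤ a → ∀ (arr : List (List Int)) (it : List Int),
      (PySem.List.pyRange a (a + n) 1).foldl (pvCellStep y) (arr, it, false)
      = (arr.modify y.toNat (fun row => pvSetSeg row a.toNat (it.take n)),
         it.drop n, decide (it.length < n)) := by
  intro n
  induction n with
  | zero =>
      intro a _ arr it
      rw [PySem.List.pyRange_one_eq_nil (by simp)]
      simp [pvSetSeg, pv_modify_id]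
  | succ n ih =>
      intro a ha arr it
      have hcons : PySem.List.pyRange a (a + (n + 1 : Nat)) 1
          = a :: PySem.List.pyRange (a + 1) (a + (n + 1 : Nat)) 1 :=
        PySem.List.pyRange_one_cons (by push_cast; omega)
      have harg : a + ((n : Int) + 1) = (a + 1) + (n : Int) := by ring
      cases it with
      | nil =>
          rw [hcons]
          simp only [List.foldl_cons, pvCellStep]
          rw [pv_frozen]
          simp [pvSetSeg, pv_modify_id]
      | cons v rest =>
          rw [hcons]
          simp only [List.foldl_cons, pvCellStep]
          push_cast
          rw [harg]
          rw [ih (a + 1) (by omega) _ rest]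
          rw [pv_modify_modify]
          have htn : (a + 1).toNat = a.toNat + 1 := by omega
          simp only [Prod.mk.injEq]
          refine ⟨?_, ?_, ?_⟩
          · congr 1
            funext row
            simp [pvSetSeg, htn]
          · simp
          · simp only [decide_eq_decide, List.length_cons]
            omega

theorem pv_width_range (width : Int) :
    PySem.List.pyRange 0 width 1 = PySem.List.pyRange 0 (0 + (width.toNat : Int)) 1 := by
  have h : (width - 0).toNat = (0 + (width.toNat : Int) - 0).toNat := by omega
  rw [PySem.List.pyRange_one, PySem.List.pyRange_one, h]

theorem pv_outer (items : List Int) (width : Int) (H : Nat) :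
    ∀ (k : Nat), k ≤ H →
      (PySem.List.pyRange 0 (k : Int) 1).foldl
        (fun s y => (PySem.List.pyRange 0 width 1).foldl (pvCellStep y) s)
        (List.replicate H (List.replicate width.toNat (-1)), items, false)
      = ((List.range k).map (pvRow items width.toNat)
           ++ List.replicate (H - k) (List.replicate width.toNat (-1)),
         items.drop (k * width.toNat),
         decide (items.length < k * width.toNat)) := by
  intro k
  induction k with
  | zero =>
      intro _
      rw [show PySem.List.pyRange 0 (((0 : Nat) : Int)) 1 = []
            from PySem.List.pyRange_one_eq_nil (by omega)]
      simp
  | succ k ih =>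
      intro hk
      have hk' : k ≤ H := Nat.le_of_succ_le hk
      have hsp : PySem.List.pyRange 0 ((k + 1 : Nat) : Int) 1
          = PySem.List.pyRange 0 (k : Int) 1 ++ [(k : Int)] := by
        push_cast
        exact PySem.List.pyRange_one_succ_right (by positivity)
      rw [hsp, List.foldl_append, ih hk']
      simp only [List.foldl_cons, List.foldl_nil]
      set W := width.toNat with hW
      have hrep : List.replicate (H - k) (List.replicate W (-1))
          = List.replicate W (-1) :: List.replicate (H - (k + 1)) (List.replicate W (-1)) := by
        have : H - k = (H - (k + 1)) + 1 := by omega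
        rw [this, List.replicate_succ]
      by_cases hstop : items.length < k * W
      · -- already stopped: the row stays all -1, which is pvRow of an empty chunk
        simp only [hstop, decide_true]
        rw [pv_frozen]
        have hdropnil : items.drop (k * W) = [] :=
          List.drop_eq_nil_of_le (Nat.le_of_lt hstop)
        have hrowk : pvRow items W k = List.replicate W (-1) := by
          unfold pvRow
          rw [hdropnil]
          simp
        simp only [Prod.mk.injEq]
        refine ⟨?_, ?_, ?_⟩
        · rw [hrep, List.range_succ]
          simp [hrowk]
        · have h2 : items.drop ((k + 1) * W) = [] :=
            List.drop_eq_nil_of_le (by rw [Nat.succ_mul]; omega)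
          rw [hdropnil, h2]
        · symm
          simp only [decide_eq_true_eq, Nat.succ_mul]
          omega
      · -- still filling: one application of the inner-loop lemma
        simp only [hstop, decide_false]
        rw [pv_width_range width, ← hW, pv_inner (k : Int) W 0 (by omega)]
        set it := items.drop (k * W) with hit
        have hitlen : it.length = items.length - k * W := by simp [hit]
        have hGlen : ((List.range k).map (pvRow items W)).length = k := by simp
        have hmod :
            (((List.range k).map (pvRow items W)
                ++ List.replicate (H - k) (List.replicate W (-1))).modify ((k : Int)).toNat
              (fun row => pvSetSeg row ((0 : Int)).toNat (it.take W)))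
            = (List.range (k + 1)).map (pvRow items W)
                ++ List.replicate (H - (k + 1)) (List.replicate W (-1)) := by
          have h0 : ((0 : Int)).toNat = 0 := rfl
          have hkx : ((k : Int)).toNat = k := by simp
          rw [h0, hkx, pv_modify_append' _ _ _ _ hGlen, hrep]
          have hmod0 : (List.replicate W (-1)
                :: List.replicate (H - (k + 1)) (List.replicate W (-1))).modify 0
                (fun row => pvSetSeg row 0 (it.take W))
              = pvSetSeg (List.replicate W (-1)) 0 (it.take W)
                :: List.replicate (H - (k + 1)) (List.replicate W (-1)) := by
            simp
          rw [hmod0]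
          have hfill : pvSetSeg (List.replicate W (-1)) 0 (it.take W)
              = it.take W ++ List.replicate (W - (it.take W).length) (-1) := by
            have := pv_setSeg_fill (it.take W) [] (List.replicate W (-1))
              (by simp)
            simpa using this
          have hrowk : pvSetSeg (List.replicate W (-1)) 0 (it.take W) = pvRow items W k := by
            rw [hfill]; unfold pvRow; rw [← hit]
          rw [hrowk, List.range_succ]
          simp
        rw [hmod]
        simp only [Prod.mk.injEq]
        refine ⟨trivial, ?_, ?_⟩
        · rw [hit, List.drop_drop]
          congr 1
          ring
        · simp only [decide_eq_decide, hitlen, Nat.succ_mul]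
          omega

theorem pv_A_eq_grid (items : List Int) (width height : Int) :
    make_2d_array_yx_seeded_row_order_using_iter items width height
      = pvGrid items width.toNat height.toNat := by
  unfold make_2d_array_yx_seeded_row_order_using_iter
  rw [pv_seed_eq]
  have hrange : PySem.List.pyRange 0 height 1
      = PySem.List.pyRange 0 ((height.toNat : Nat) : Int) 1 := by
    have h : (height - 0).toNat = (((height.toNat : Nat) : Int) - 0).toNat := by omega
    rw [PySem.List.pyRange_one, PySem.List.pyRange_one, h]
  simp only [hrange]
  rw [pv_outer items width height.toNat height.toNat (Nat.le_refl _)]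
  simp [pvGrid]

theorem pv_B_eq_grid (items : List Int) (width height : Int) :
    make_2d_array_yx_seeded_row_order_using_iter_alt items width height
      = pvGrid items width.toNat height.toNat := by
  unfold make_2d_array_yx_seeded_row_order_using_iter_alt
  rw [pv_foldl_append_map]
  rw [PySem.List.pyRange_one]
  simp only [List.map_map, Int.sub_zero, pvGrid]
  apply List.map_congr_left
  intro k _
  have hw : max width 0 = ((width.toNat : Nat) : Int) := by omega
  set W := width.toNat with hW
  have harg : (0 + (k : Int)) * (W : Int) = ((k * W : Nat) : Int) := by push_cast; ring
  have harg2 : (0 + (k : Int) + 1) * (W : Int) = ((k * W : Nat) : Int) + (W : Int) := by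
    push_cast; ring
  simp only [Function.comp, hw, harg, harg2]
  rw [PySem.List.slice_natCast_add]
  unfold pvRow
  congr 1
  congr 1
  omega

-- ===== VERDICT (by name: the statement is the Claim_ definition above) =====
theorem make_2d_array_yx_seeded_row_order_using_iter_spec : Claim_equal_make_2d_array_yx_seeded_row_order_using_iter := by
  intro items width height _
  unfold Spec_make_2d_array_yx_seeded_row_order_using_iter
  rw [pv_A_eq_grid, pv_B_eq_grid]
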